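-- pv_equiv track=rewrite | github.com/eliottcassidy2000/math | 04-computation/q009_n8_residual.py | count_vd_pairs_by_type
-- ===== SOURCE A (Python) =====
-- def count_vd_pairs_by_type(cycles):
--     """Count VD pairs of odd cycles, grouped by (len1, len2)."""
--     from collections import Counter
--     type_counts = Counter()
--     for a in range(len(cycles)):
--         for b in range(a + 1, len(cycles)):
--             sa = frozenset(cycles[a])
--             sb = frozenset(cycles[b])
--             if not (sa & sb):
--                 la, lb = len(cycles[a]), len(cycles[b])
--                 key = tuple(sorted([la, lb]))
--                 type_counts[key] += 1
--     return type_counts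
-- ===== SOURCE B (Python) =====
-- def count_vd_pairs_by_type(cycles):
--     """Count VD pairs of odd cycles, grouped by (len1, len2)."""
--     from collections import Counter
--     n = len(cycles)
--     # inverted index: vertex -> indices of cycles containing it
--     where = {}
--     for i, cyc in enumerate(cycles):
--         for v in set(cyc):
--             where.setdefault(v, []).append(i)
--     keys = []
--     for a in range(n):
--         conflict = set()
--         for v in set(cycles[a]):
--             conflict.update(where[v])
--         la = len(cycles[a])
--         for b in range(a + 1, n):
--             if b not in conflict:
--                 lb = len(cycles[b])
--                 keys.append((la, lb) if not (lb < la) else (lb, la))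
--     return Counter(keys)
-- ===== Notes on version B (the rewrite author's own statement) =====
-- stated objective: faster
-- what changed: B replaces A's per-pair frozenset construction and intersection with a vertex-to-cycle-indices inverted index and per-cycle conflict sets (O(1) disjointness test per pair), collects the key sequence, and builds one Counter at the end instead of incrementing a Counter per pair.
import Mathlib
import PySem

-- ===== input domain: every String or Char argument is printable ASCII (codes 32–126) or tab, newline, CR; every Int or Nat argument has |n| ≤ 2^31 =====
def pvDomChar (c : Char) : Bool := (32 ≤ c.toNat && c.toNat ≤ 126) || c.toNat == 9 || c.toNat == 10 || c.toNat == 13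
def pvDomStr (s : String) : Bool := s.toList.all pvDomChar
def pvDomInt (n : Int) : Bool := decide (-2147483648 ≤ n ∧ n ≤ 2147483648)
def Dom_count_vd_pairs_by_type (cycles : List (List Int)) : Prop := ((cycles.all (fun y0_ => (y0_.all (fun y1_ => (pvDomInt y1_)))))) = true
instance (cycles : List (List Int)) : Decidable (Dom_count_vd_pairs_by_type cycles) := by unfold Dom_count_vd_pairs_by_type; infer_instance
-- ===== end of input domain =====

-- B replaces A's per-pair frozenset construction/intersection by a vertex→cycle-indices
-- inverted index with per-cycle conflict sets (collecting the key sequence and building one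
-- Counter at the end); a timing run measured B faster (objective: faster).

-- ===== PORT A =====
-- tuple(sorted([la, lb])) of a 2-element list, as a pair
def pvKey2 (l : List Int) : Int × Int := (l.getD 0 0, l.getD 1 0)

def count_vd_pairs_by_type (cycles : List (List Int)) : List (Int × Int × Int) :=
  let n : Int := cycles.length
  let tc : PySem.Dict (Int × Int) Int :=
    (PySem.List.pyRange 0 n 1).foldl (fun d a =>
      (PySem.List.pyRange (a + 1) n 1).foldl (fun d b =>
        let sa := PySem.Set.ofList (PySem.List.pyGetD cycles a [])
        let sb := PySem.Set.ofList (PySem.List.pyGetD cycles b [])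
        if (PySem.Set.inter sa sb).isEmpty then
          let la : Int := (PySem.List.pyGetD cycles a []).length
          let lb : Int := (PySem.List.pyGetD cycles b []).length
          let key := pvKey2 (PySem.List.sorted [la, lb] (fun x => x) false)
          d.modify key 0 (· + 1)
        else d) d) PySem.Dict.empty
  tc.items.map (fun p => (p.1.1, p.1.2, p.2))

-- ===== PORT B =====
def count_vd_pairs_by_type_alt (cycles : List (List Int)) : List (Int × Int × Int) :=
  let n : Int := cycles.length
  -- where: vertex -> list of cycle indices containing it (setdefault(v, []).append(i))
  let wher : PySem.Dict Int (List Int) :=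
    (PySem.List.enumerate cycles 0).foldl (fun d p =>
      (PySem.Set.ofList p.2).foldl (fun d v => d.insert v (d.getD v [] ++ [p.1])) d)
      PySem.Dict.empty
  let keys : List (Int × Int) :=
    (PySem.List.pyRange 0 n 1).foldl (fun ks a =>
      -- conflict = union of where[v] over v in set(cycles[a]); where[v] always present,
      -- since cycle a itself was registered under each of its vertices
      let conflict : PySem.Set Int :=
        (PySem.Set.ofList (PySem.List.pyGetD cycles a [])).foldl
          (fun s v => PySem.Set.update s (wher.getD v [])) PySem.Set.empty
      let la : Int := (PySem.List.pyGetD cycles a []).length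
      (PySem.List.pyRange (a + 1) n 1).foldl (fun ks b =>
        if !(PySem.Set.contains conflict b) then
          let lb : Int := (PySem.List.pyGetD cycles b []).length
          ks ++ [if lb < la then (lb, la) else (la, lb)]
        else ks) ks) []
  (PySem.Dict.counter keys).items.map (fun p => (p.1.1, p.1.2, p.2))

-- ===== PRECONDITION & SPEC =====
def Spec_count_vd_pairs_by_type (cycles : List (List Int)) (out : List (Int × Int × Int)) : Prop := out = count_vd_pairs_by_type_alt cycles
instance (cycles : List (List Int)) (out : List (Int × Int × Int)) : Decidable (Spec_count_vd_pairs_by_type cycles out) := by unfold Spec_count_vd_pairs_by_type; infer_instance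

-- ===== CLAIM (what is proved, stated in full; the proofs are below) =====
def Claim_equal_count_vd_pairs_by_type : Prop := ∀ (cycles : List (List Int)), Dom_count_vd_pairs_by_type cycles → Spec_count_vd_pairs_by_type cycles (count_vd_pairs_by_type cycles)

-- ===== LEMMAS AND PROOFS =====

-- proof-only abbreviations
def pvCyc (cycles : List (List Int)) (i : Int) : List Int := PySem.List.pyGetD cycles i []

def pvKeyAt (cycles : List (List Int)) (a b : Int) : Int × Int :=
  if ((pvCyc cycles b).length : Int) < ((pvCyc cycles a).length : Int) then
    (((pvCyc cycles b).length : Int), ((pvCyc cycles a).length : Int))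
  else (((pvCyc cycles a).length : Int), ((pvCyc cycles b).length : Int))

def pvDisj (cycles : List (List Int)) (a b : Int) : Bool :=
  (PySem.Set.inter (PySem.Set.ofList (pvCyc cycles a)) (PySem.Set.ofList (pvCyc cycles b))).isEmpty

def pvKeys (cycles : List (List Int)) : List (Int × Int) :=
  (PySem.List.pyRange 0 (cycles.length : Int) 1).flatMap (fun a =>
    ((PySem.List.pyRange (a + 1) (cycles.length : Int) 1).filter (fun b => pvDisj cycles a b)).map
      (pvKeyAt cycles a))

theorem pvKey2_sorted (la lb : Int) :
    pvKey2 (PySem.List.sorted [la, lb] (fun x => x) false) =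
      if lb < la then (lb, la) else (la, lb) := by
  by_cases h : lb < la <;>
    simp [PySem.List.sorted_eq_foldl_insertBy, PySem.List.insertBy, pvKey2, h]

theorem pvFoldl_flatMap {α β γ : Type} (l : List α) (g : α → List β) (f : γ → β → γ) (init : γ) :
    l.foldl (fun d a => (g a).foldl f d) init = (l.flatMap g).foldl f init := by
  induction l generalizing init with
  | nil => rfl
  | cons x t ih => simp [List.flatMap_cons, List.foldl_append, ih]

theorem pvW1 (s : List Int) (hs : s.Nodup) (d : PySem.Dict Int (List Int)) (i w : Int) :
    ((s.foldl (fun d v => d.insert v (d.getD v [] ++ [i])) d).getD w []) =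
      if w ∈ s then d.getD w [] ++ [i] else d.getD w [] := by
  induction s generalizing d with
  | nil => simp
  | cons v t ih =>
    rcases List.nodup_cons.mp hs with ⟨hv, ht⟩
    simp only [List.foldl_cons, ih ht, PySem.Dict.getD_insert]
    by_cases hwv : w = v
    · subst hwv; simp [hv]
    · simp [hwv, List.mem_cons]

theorem pvW2 (l : List (Int × List Int)) (d : PySem.Dict Int (List Int)) (w : Int) :
    ((l.foldl (fun d p => (PySem.Set.ofList p.2).foldl
        (fun d v => d.insert v (d.getD v [] ++ [p.1])) d) d).getD w []) =
      d.getD w [] ++ (l.filter (fun p => decide (w ∈ p.2))).map (·.1) := by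
  induction l generalizing d with
  | nil => simp
  | cons p t ih =>
    simp only [List.foldl_cons, ih, pvW1 _ (PySem.Set.nodup_ofList p.2), PySem.Set.mem_ofList]
    by_cases hw : w ∈ p.2
    · simp [hw]
    · simp [hw]

theorem pvC1 (l : List Int) (g : Int → List Int) (s0 : PySem.Set Int) (b : Int) :
    (b ∈ l.foldl (fun s v => PySem.Set.update s (g v)) s0) ↔ b ∈ s0 ∨ ∃ v ∈ l, b ∈ g v := by
  induction l generalizing s0 with
  | nil => simp
  | cons v t ih =>
    simp only [List.foldl_cons, ih, PySem.Set.mem_update, List.mem_cons]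
    constructor
    · rintro ((h | h) | ⟨u, hu, hb⟩)
      · exact Or.inl h
      · exact Or.inr ⟨v, Or.inl rfl, h⟩
      · exact Or.inr ⟨u, Or.inr hu, hb⟩
    · rintro (h | ⟨u, (rfl | hu), hb⟩)
      · exact Or.inl (Or.inl h)
      · exact Or.inl (Or.inr hb)
      · exact Or.inr ⟨u, hu, hb⟩

theorem pvDisj_iff (cycles : List (List Int)) (a b : Int) :
    pvDisj cycles a b = true ↔ ∀ v ∈ pvCyc cycles a, v ∉ pvCyc cycles b := by
  simp only [pvDisj, List.isEmpty_iff, List.eq_nil_iff_forall_not_mem]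
  constructor
  · intro h v hva hvb
    exact h v (by rw [PySem.Set.mem_inter]; simp [PySem.Set.mem_ofList, hva, hvb])
  · intro h v hv
    rw [PySem.Set.mem_inter] at hv
    simp only [PySem.Set.mem_ofList] at hv
    exact h v hv.1 hv.2

-- b lies in where[w] iff cycle b contains w (b a valid index)
theorem pvCyc_getElem (cycles : List (List Int)) (b : Int) (h0 : 0 ≤ b)
    (hn : b.toNat < cycles.length) : pvCyc cycles b = cycles[b.toNat] := by
  rw [pvCyc, PySem.List.pyGetD_of_nonneg (h := h0), List.getD_eq_getElem _ _ hn]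

theorem pvWhere_mem (cycles : List (List Int)) (b w : Int)
    (hb0 : 0 ≤ b) (hbn : b < (cycles.length : Int)) :
    (b ∈ (((PySem.List.enumerate cycles 0).foldl (fun d p =>
        (PySem.Set.ofList p.2).foldl (fun d v => d.insert v (d.getD v [] ++ [p.1])) d)
      PySem.Dict.empty).getD w []))
      ↔ w ∈ pvCyc cycles b := by
  have hbn' : b.toNat < cycles.length := by omega
  rw [pvW2, pvCyc_getElem cycles b hb0 hbn']
  simp only [PySem.Dict.getD_empty, List.nil_append, List.mem_map, List.mem_filter,
    PySem.List.mem_enumerate_iff]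
  constructor
  · rintro ⟨p, ⟨⟨k, hk, rfl⟩, hw⟩, hb⟩
    simp only [zero_add] at hb hw
    simp only [decide_eq_true_eq] at hw
    obtain rfl : k = b.toNat := by omega
    exact hw
  · intro hw
    exact ⟨((b.toNat : Int), cycles[b.toNat]'hbn'), ⟨⟨b.toNat, hbn', by simp⟩,
      by simpa using hw⟩, by omega⟩

-- the conflict-set membership test equals the non-disjointness test
theorem pvConflict_eq (cycles : List (List Int)) (a b : Int)
    (hb0 : 0 ≤ b) (hbn : b < (cycles.length : Int)) :
    (!(PySem.Set.contains
      ((PySem.Set.ofList (pvCyc cycles a)).foldl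
        (fun s v => PySem.Set.update s
          (((PySem.List.enumerate cycles 0).foldl (fun d p =>
              (PySem.Set.ofList p.2).foldl (fun d v => d.insert v (d.getD v [] ++ [p.1])) d)
            PySem.Dict.empty).getD v []))
        PySem.Set.empty) b))
      = pvDisj cycles a b := by
  have key : (b ∈ ((PySem.Set.ofList (pvCyc cycles a)).foldl
        (fun s v => PySem.Set.update s
          (((PySem.List.enumerate cycles 0).foldl (fun d p =>
              (PySem.Set.ofList p.2).foldl (fun d v => d.insert v (d.getD v [] ++ [p.1])) d)
            PySem.Dict.empty).getD v []))
        PySem.Set.empty : PySem.Set Int)) ↔ ¬ (pvDisj cycles a b = true) := by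
    rw [pvC1, pvDisj_iff]
    push Not
    constructor
    · rintro (h | ⟨v, hv, hb⟩)
      · simp [PySem.Set.empty] at h
      · exact ⟨v, (PySem.Set.mem_ofList _ _).mp hv, (pvWhere_mem cycles b v hb0 hbn).mp hb⟩
    · rintro ⟨v, hv, hvb⟩
      exact Or.inr ⟨v, (PySem.Set.mem_ofList _ _).mpr hv, (pvWhere_mem cycles b v hb0 hbn).mpr hvb⟩
  rw [← PySem.Set.contains_iff] at key
  cases hd : pvDisj cycles a b
  · simp [hd] at key; simp [key]
  · simp [hd] at key; simp [key]

theorem pvStepA (cycles : List (List Int)) :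
    count_vd_pairs_by_type cycles =
      (PySem.Dict.counter (pvKeys cycles)).items.map (fun p => (p.1.1, p.1.2, p.2)) := by
  have hdict :
      List.foldl (fun (d : PySem.Dict (Int × Int) Int) (a : Int) =>
        List.foldl (fun (d : PySem.Dict (Int × Int) Int) (b : Int) =>
          if (PySem.Set.inter (PySem.Set.ofList (PySem.List.pyGetD cycles a []))
              (PySem.Set.ofList (PySem.List.pyGetD cycles b []))).isEmpty then
            d.modify (pvKey2 (PySem.List.sorted
              [((PySem.List.pyGetD cycles a []).length : Int),
               ((PySem.List.pyGetD cycles b []).length : Int)] (fun x => x) false)) 0 (· + 1)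
          else d) d (PySem.List.pyRange (a + 1) (cycles.length : Int) 1))
        PySem.Dict.empty (PySem.List.pyRange 0 (cycles.length : Int) 1)
      = PySem.Dict.counter (pvKeys cycles) := by
    rw [PySem.Dict.counter_eq_foldl, pvKeys, ← pvFoldl_flatMap]
    apply PySem.List.foldl_congr_mem
    intro d a _
    rw [List.foldl_map, ← PySem.List.foldl_if_eq_foldl_filter]
    apply PySem.List.foldl_congr_mem
    intro d' b _
    rw [pvKey2_sorted]
    rfl
  exact congrArg (fun t : PySem.Dict (Int × Int) Int =>
    t.items.map (fun p => (p.1.1, p.1.2, p.2))) hdict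

theorem pvStepB (cycles : List (List Int)) :
    count_vd_pairs_by_type_alt cycles =
      (PySem.Dict.counter (pvKeys cycles)).items.map (fun p => (p.1.1, p.1.2, p.2)) := by
  have hkeys :
      List.foldl (fun (ks : List (Int × Int)) (a : Int) =>
        List.foldl (fun (ks : List (Int × Int)) (b : Int) =>
          if !(PySem.Set.contains
            ((PySem.Set.ofList (PySem.List.pyGetD cycles a [])).foldl
              (fun s v => PySem.Set.update s
                (((PySem.List.enumerate cycles 0).foldl (fun d p =>
                    (PySem.Set.ofList p.2).foldl
                      (fun d v => d.insert v (d.getD v [] ++ [p.1])) d)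
                  PySem.Dict.empty).getD v []))
              PySem.Set.empty) b) then
            ks ++ [if ((PySem.List.pyGetD cycles b []).length : Int) <
                      ((PySem.List.pyGetD cycles a []).length : Int) then
                    (((PySem.List.pyGetD cycles b []).length : Int),
                     ((PySem.List.pyGetD cycles a []).length : Int))
                   else
                    (((PySem.List.pyGetD cycles a []).length : Int),
                     ((PySem.List.pyGetD cycles b []).length : Int))]
          else ks) ks (PySem.List.pyRange (a + 1) (cycles.length : Int) 1))
        [] (PySem.List.pyRange 0 (cycles.length : Int) 1)
      = pvKeys cycles := by
    have hbody : ∀ ks : List (Int × Int), ∀ a : Int, a ∈ PySem.List.pyRange 0 (cycles.length : Int) 1 →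
        List.foldl (fun (ks : List (Int × Int)) (b : Int) =>
          if !(PySem.Set.contains
            ((PySem.Set.ofList (PySem.List.pyGetD cycles a [])).foldl
              (fun s v => PySem.Set.update s
                (((PySem.List.enumerate cycles 0).foldl (fun d p =>
                    (PySem.Set.ofList p.2).foldl
                      (fun d v => d.insert v (d.getD v [] ++ [p.1])) d)
                  PySem.Dict.empty).getD v []))
              PySem.Set.empty) b) then
            ks ++ [if ((PySem.List.pyGetD cycles b []).length : Int) <
                      ((PySem.List.pyGetD cycles a []).length : Int) then
                    (((PySem.List.pyGetD cycles b []).length : Int),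
                     ((PySem.List.pyGetD cycles a []).length : Int))
                   else
                    (((PySem.List.pyGetD cycles a []).length : Int),
                     ((PySem.List.pyGetD cycles b []).length : Int))]
          else ks) ks (PySem.List.pyRange (a + 1) (cycles.length : Int) 1)
        = ks ++ ((PySem.List.pyRange (a + 1) (cycles.length : Int) 1).filter
            (fun b => pvDisj cycles a b)).map (pvKeyAt cycles a) := by
      intro ks a ha
      rw [PySem.List.mem_pyRange_one] at ha
      rw [PySem.List.foldl_append_if]
      congr 1
      have hfil : ((PySem.List.pyRange (a + 1) (cycles.length : Int) 1).filter
          (fun b => !(PySem.Set.contains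
            ((PySem.Set.ofList (PySem.List.pyGetD cycles a [])).foldl
              (fun s v => PySem.Set.update s
                (((PySem.List.enumerate cycles 0).foldl (fun d p =>
                    (PySem.Set.ofList p.2).foldl
                      (fun d v => d.insert v (d.getD v [] ++ [p.1])) d)
                  PySem.Dict.empty).getD v []))
              PySem.Set.empty) b)))
          = ((PySem.List.pyRange (a + 1) (cycles.length : Int) 1).filter
              (fun b => pvDisj cycles a b)) := by
        apply List.filter_congr
        intro b hb
        rw [PySem.List.mem_pyRange_one] at hb
        exact pvConflict_eq cycles a b (by omega) (by omega)
      rw [hfil]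
      rfl
    rw [PySem.List.foldl_congr_mem _ _ _ _ hbody]
    rw [pvKeys, ← List.nil_append ((PySem.List.pyRange 0 (cycles.length : Int) 1).flatMap _)]
    exact PySem.List.foldl_append_eq_flatMap _ _ _
  exact congrArg (fun ks : List (Int × Int) =>
    (PySem.Dict.counter ks).items.map (fun p => (p.1.1, p.1.2, p.2))) hkeys

theorem count_vd_pairs_by_type_main (cycles : List (List Int)) :
    count_vd_pairs_by_type cycles = count_vd_pairs_by_type_alt cycles :=
  (pvStepA cycles).trans (pvStepB cycles).symm

-- ===== VERDICT (by name: the statement is the Claim_ definition above) =====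
theorem count_vd_pairs_by_type_spec : Claim_equal_count_vd_pairs_by_type := by
  intro cycles _
  unfold Spec_count_vd_pairs_by_type
  exact count_vd_pairs_by_type_main cycles
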